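-- pv_equiv track=rewrite | github.com/YashB63/GFG-Daily-Questions | Day 80/Prime String/prime_string.py | isPrimeString
-- ===== SOURCE A (Python) =====
-- import math
--
-- def isPrime(n):
--
--     if n== 1:
--         return False
--     for i in range(2, int(math.sqrt(n) + 1)):
--         if n%i == 0:
--             return False
--     return True
--
-- def isPrimeString(s):
--
--     count = 0
--     for i in s:
--         count += ord(i)
--     if isPrime(count):
--         return True
--     else:
--         return False
-- ===== SOURCE B (Python) =====
-- def isPrimeString(s):
--     n = sum(map(ord, s))
--     if n == 1:
--         return False
--     return all(n % i for i in range(2, n))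
-- ===== Notes on version B (the rewrite author's own statement) =====
-- stated objective: simpler
-- what changed: Replaces the explicit accumulator loop and the sqrt-bounded trial-division helper with a sum()/all() one-liner that tests every candidate divisor in range(2, n).
import Mathlib
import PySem

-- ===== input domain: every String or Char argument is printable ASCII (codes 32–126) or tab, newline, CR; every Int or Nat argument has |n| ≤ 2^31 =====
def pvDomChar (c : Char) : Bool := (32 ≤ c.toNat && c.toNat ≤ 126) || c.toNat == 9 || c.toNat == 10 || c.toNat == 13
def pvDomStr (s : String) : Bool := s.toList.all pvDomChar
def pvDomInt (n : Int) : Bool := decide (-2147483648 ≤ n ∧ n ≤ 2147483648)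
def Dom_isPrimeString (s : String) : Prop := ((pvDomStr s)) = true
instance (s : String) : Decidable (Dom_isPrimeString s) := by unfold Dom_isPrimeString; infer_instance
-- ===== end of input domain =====

-- B replaces the explicit count loop and the sqrt-bounded trial division of A by a
-- sum()/all() one-liner testing every candidate divisor in range(2, n) (objective: simpler).

-- ===== PORT A =====
-- loop 'for i in range(...): if n % i == 0: return False' / 'return True'
def pvPrimeLoopA (n : Int) : List Int → Bool
  | [] => true
  | i :: rest => if PySem.Int.mod n i = 0 then false else pvPrimeLoopA n rest

-- int(math.sqrt(n) + 1) ported as Nat.sqrt n.toNat + 1; exact for 0 ≤ n < 2^52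
-- (n here is a sum of char codes, so 0 ≤ n; float sqrt is correctly rounded at this magnitude)
def pvIsPrimeA (n : Int) : Bool :=
  if n = 1 then false
  else pvPrimeLoopA n (PySem.List.pyRange 2 ((Nat.sqrt n.toNat : Int) + 1) 1)

def isPrimeString (s : String) : Bool :=
  pvIsPrimeA (s.toList.foldl (fun count c => count + (c.toNat : Int)) 0)

-- ===== PORT B =====
def isPrimeString_alt (s : String) : Bool :=
  let n : Int := (s.toList.map (fun c => (c.toNat : Int))).sum
  if n = 1 then false
  else (PySem.List.pyRange 2 n 1).all (fun i => !(PySem.Int.mod n i = 0 : Bool))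

-- ===== PRECONDITION & SPEC =====
def Spec_isPrimeString (s : String) (out : Bool) : Prop := out = isPrimeString_alt s
instance (s : String) (out : Bool) : Decidable (Spec_isPrimeString s out) := by unfold Spec_isPrimeString; infer_instance

-- ===== CLAIM (what is proved, stated in full; the proofs are below) =====
def Claim_equal_isPrimeString : Prop := ∀ (s : String), Dom_isPrimeString s → Spec_isPrimeString s (isPrimeString s)

-- ===== LEMMAS AND PROOFS =====

-- the early-return loop is an 'all' over the candidate list
theorem pvPrimeLoopA_eq_all (n : Int) (l : List Int) :
    pvPrimeLoopA n l = l.all (fun i => !(PySem.Int.mod n i = 0 : Bool)) := by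
  induction l with
  | nil => rfl
  | cons i rest ih =>
      simp only [pvPrimeLoopA, List.all_cons]
      split_ifs with h <;> simp [h, ih]

-- both counts compute the same sum
theorem pvSum_eq (cs : List Char) :
    cs.foldl (fun count c => count + (c.toNat : Int)) 0 = (cs.map (fun c => (c.toNat : Int))).sum := by
  have h : ∀ (cs : List Char) (acc : Int),
      cs.foldl (fun count c => count + (c.toNat : Int)) acc
        = acc + (cs.map (fun c => (c.toNat : Int))).sum := by
    intro cs
    induction cs with
    | nil => simp
    | cons c cs ih => intro acc; simp [ih]; ring
  simpa using h cs 0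

-- 'all candidates fail to divide' over a range, as a Prop
theorem pvAll_range_iff (n a b : Int) :
    ((PySem.List.pyRange a b 1).all (fun i => !(PySem.Int.mod n i = 0 : Bool)) = true)
      ↔ ∀ i : Int, a ≤ i → i < b → ¬ i ∣ n := by
  simp only [List.all_eq_true, PySem.List.mem_pyRange_one, Bool.not_eq_eq_eq_not, Bool.not_true,
    decide_eq_false_iff_not, PySem.Int.mod_eq_zero_iff_dvd]
  exact ⟨fun h i h1 h2 => h i ⟨h1, h2⟩, fun h i ⟨h1, h2⟩ => h i h1 h2⟩

-- the core equivalence of the two primality tests on nonnegative inputs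
theorem pvIsPrime_eq (n : Int) (hn : 0 ≤ n) :
    pvIsPrimeA n
      = if n = 1 then false
        else (PySem.List.pyRange 2 n 1).all (fun i => !(PySem.Int.mod n i = 0 : Bool)) := by
  unfold pvIsPrimeA
  split_ifs with h1
  · rfl
  obtain ⟨m, rfl⟩ := Int.eq_ofNat_of_zero_le hn
  rw [pvPrimeLoopA_eq_all, Int.toNat_natCast]
  rcases Nat.lt_or_ge m 2 with hm | hm
  · -- m = 0: both ranges are empty; m = 1 excluded by h1
    interval_cases m
    · rfl
    · simp at h1
  · -- m ≥ 2: both sides decide m.Prime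
    have hA : ((PySem.List.pyRange 2 ((Nat.sqrt m : Int) + 1) 1).all
        (fun i => !(PySem.Int.mod (m : Int) i = 0 : Bool)) = true) ↔ Nat.Prime m := by
      rw [pvAll_range_iff, Nat.prime_def_le_sqrt]
      constructor
      · intro h
        refine ⟨hm, fun k hk2 hks hd => ?_⟩
        exact h (k : Int) (by exact_mod_cast hk2) (by omega) (by exact_mod_cast hd)
      · rintro ⟨-, h⟩ i hi2 hisqrt hd
        lift i to ℕ using (by omega : (0:Int) ≤ i)
        exact h i (by exact_mod_cast hi2) (by omega) (by exact_mod_cast hd)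
    have hB : ((PySem.List.pyRange 2 (m : Int) 1).all
        (fun i => !(PySem.Int.mod (m : Int) i = 0 : Bool)) = true) ↔ Nat.Prime m := by
      rw [pvAll_range_iff, Nat.prime_def_lt']
      constructor
      · intro h
        refine ⟨hm, fun k hk2 hkm hd => ?_⟩
        exact h (k : Int) (by exact_mod_cast hk2) (by exact_mod_cast hkm) (by exact_mod_cast hd)
      · rintro ⟨-, h⟩ i hi2 him hd
        lift i to ℕ using (by omega : (0:Int) ≤ i)
        exact h i (by exact_mod_cast hi2) (by exact_mod_cast him) (by exact_mod_cast hd)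
    exact Bool.eq_iff_iff.2 (hA.trans hB.symm)

theorem pvSum_nonneg (cs : List Char) : 0 ≤ (cs.map (fun c => (c.toNat : Int))).sum := by
  induction cs with
  | nil => simp
  | cons c cs ih => simp; positivity

-- ===== VERDICT (by name: the statement is the Claim_ definition above) =====
theorem isPrimeString_spec : Claim_equal_isPrimeString := by
  intro s _
  unfold Spec_isPrimeString isPrimeString isPrimeString_alt
  rw [pvSum_eq]
  exact pvIsPrime_eq _ (pvSum_nonneg s.toList)
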